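-- pv_equiv track=rewrite | github.com/GIST-IRR/Parse-Focusing | noising_dataset.py | split_by_key
-- ===== SOURCE A (Python) =====
-- from collections import OrderedDict, Counter, defaultdict
--
-- def split_by_key(data, key):
--     # split data to ordered dictionary by key
--     result = {}
--     for d in data:
--         v = d[key]
--         if v in result:
--             result[v].append(d)
--         else:
--             result[v] = [d]
--     return OrderedDict(sorted(result.items()))
-- ===== SOURCE B (Python) =====
-- from collections import OrderedDict
--
-- def split_by_key(data, key):
--     # sorted distinct keys, then one filter pass per key (no accumulator dict)
--     ks = sorted({d[key] for d in data})
--     return OrderedDict((k, [d for d in data if d[key] == k]) for k in ks)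
-- ===== Notes on version B (the rewrite author's own statement) =====
-- stated objective: idiomatic
-- what changed: A accumulates rows into a dict of lists and then sorts the items; B first computes the sorted set of distinct key values and builds each group by filtering the data per key, with no accumulator dict.
import Mathlib
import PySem

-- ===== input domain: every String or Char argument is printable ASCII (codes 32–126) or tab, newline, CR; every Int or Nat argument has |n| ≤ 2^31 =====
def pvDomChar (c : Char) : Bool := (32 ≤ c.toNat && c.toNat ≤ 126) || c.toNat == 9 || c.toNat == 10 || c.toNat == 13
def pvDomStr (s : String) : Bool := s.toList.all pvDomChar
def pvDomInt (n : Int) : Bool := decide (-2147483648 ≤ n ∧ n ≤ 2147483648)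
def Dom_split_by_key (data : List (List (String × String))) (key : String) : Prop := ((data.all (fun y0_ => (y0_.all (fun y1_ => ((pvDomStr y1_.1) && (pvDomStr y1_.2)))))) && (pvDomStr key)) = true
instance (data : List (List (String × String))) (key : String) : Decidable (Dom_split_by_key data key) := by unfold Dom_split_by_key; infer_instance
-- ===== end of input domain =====

-- B replaces A's accumulate-into-a-dict-then-sort-the-items pass by: sorted distinct key
-- values first, then one filter pass of the data per key (idiomatic; no accumulator dict).

-- ===== PORT A =====
-- A builds result = {} ; for d in data: v = d[key]; append/start result[v]; then
-- OrderedDict(sorted(result.items())). Since the dict's keys are distinct, Python's tuple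
-- comparison in sorted(...) only ever compares the first components: ported as a key-sort on fst.
def split_by_key (data : List (List (String × String))) (key : String) : List (String × List (List (String × String))) :=
  let result : PySem.Dict String (List (List (String × String))) :=
    data.foldl (fun res d =>
      match (PySem.Dict.mk d).get? key with
      | some v => if res.contains v then res.modify v [] (fun l => l ++ [d]) else res.insert v [d]
      | none => res)   -- Python raises KeyError here; such inputs are outside Pre_split_by_key
    PySem.Dict.empty
  PySem.List.sorted result.items (fun p => p.1) false

-- ===== PORT B =====
-- ks = sorted({d[key] for d in data}); OrderedDict((k, [d for d in data if d[key] == k]) for k in ks)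
-- (d[key] where the key is missing raises in Python — outside Pre_; the port reads it as getD "")
def split_by_key_alt (data : List (List (String × String))) (key : String) : List (String × List (List (String × String))) :=
  let ks := PySem.List.sorted (PySem.Set.ofList (data.map (fun d => ((PySem.Dict.mk d).get? key).getD ""))) (fun k => k) false
  ks.map (fun k => (k, data.filter (fun d => ((PySem.Dict.mk d).get? key).getD "" == k)))

-- ===== PRECONDITION & SPEC =====
-- Pre_ excludes exactly the inputs where some row lacks `key`: there Python's d[key] raises KeyError.
def Pre_split_by_key (data : List (List (String × String))) (key : String) : Prop :=
  ∀ d ∈ data, (PySem.Dict.mk d).contains key = true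
instance (data : List (List (String × String))) (key : String) : Decidable (Pre_split_by_key data key) := by unfold Pre_split_by_key; infer_instance

def pvWitness_split_by_key : (List (List (String × String))) × String :=
  ([[("k", "x"), ("o", "1")], [("k", "y")], [("k", "x")]], "k")

def Spec_split_by_key (data : List (List (String × String))) (key : String) (out : List (String × List (List (String × String)))) : Prop := out = split_by_key_alt data key
instance (data : List (List (String × String))) (key : String) (out : List (String × List (List (String × String)))) : Decidable (Spec_split_by_key data key out) := by unfold Spec_split_by_key; infer_instance

-- ===== CLAIM (what is proved, stated in full; the proofs are below) =====
def Claim_equal_split_by_key : Prop := ∀ (data : List (List (String × String))) (key : String), Dom_split_by_key data key → Pre_split_by_key data key → Spec_split_by_key data key (split_by_key data key)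

-- ===== LEMMAS AND PROOFS =====

-- the key value of a row, total form (under Pre_ the lookup is always `some`)
def pvRk (key : String) (d : List (String × String)) : String :=
  ((PySem.Dict.mk d).get? key).getD ""

-- A's loop body is exactly `modify (rk d) [] (· ++ [d])` on every row that has the key
theorem pvStep_eq (key : String) (res : PySem.Dict String (List (List (String × String))))
    (d : List (String × String)) (h : (PySem.Dict.mk d).contains key = true) :
    (match (PySem.Dict.mk d).get? key with
      | some v => if res.contains v then res.modify v [] (fun l => l ++ [d]) else res.insert v [d]
      | none => res)
    = res.modify (pvRk key d) [] (fun l => l ++ [d]) := by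
  rcases hv : (PySem.Dict.mk d).get? key with _ | v
  · rw [PySem.Dict.get?_eq_none_iff_contains] at hv
    simp [hv] at h
  · simp only [pvRk, hv, Option.getD_some]
    by_cases hc : res.contains v = true
    · simp [hc]
    · simp only [Bool.not_eq_true] at hc
      simp [hc, PySem.Dict.modify, PySem.Dict.getD_of_not_contains res [] hc]

-- A's accumulator, characterised: its items are the first-occurrence-deduped key values,
-- each paired with the filter of data on that key value
theorem pvFold_items (data : List (List (String × String))) (key : String)
    (hpre : Pre_split_by_key data key) :
    (data.foldl (fun res d =>
      match (PySem.Dict.mk d).get? key with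
      | some v => if res.contains v then res.modify v [] (fun l => l ++ [d]) else res.insert v [d]
      | none => res) PySem.Dict.empty).items
    = (PySem.Set.ofList (data.map (pvRk key))).map
        (fun k => (k, data.filter (fun d => pvRk key d == k))) := by
  have hfold : data.foldl (fun res d =>
      match (PySem.Dict.mk d).get? key with
      | some v => if res.contains v then res.modify v [] (fun l => l ++ [d]) else res.insert v [d]
      | none => res) PySem.Dict.empty
      = data.foldl (fun res d => res.modify (pvRk key d) [] (fun l => l ++ [d])) PySem.Dict.empty := by
    exact PySem.List.foldl_congr_mem data _ _ _ (fun acc x hx => pvStep_eq key acc x (hpre x hx))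
  rw [hfold]
  have hkeys : (data.foldl (fun res d => res.modify (pvRk key d) [] (fun l => l ++ [d])) PySem.Dict.empty).keys
      = PySem.Set.ofList (data.map (pvRk key)) := by
    rw [PySem.Dict.keys_foldl_modify_key data (pvRk key) [] (fun _ d => fun l => l ++ [d]) PySem.Dict.empty]
    simp [PySem.Dict.keys_empty, PySem.Set.update_nil_left]
  have hnodup : (data.foldl (fun res d => res.modify (pvRk key d) [] (fun l => l ++ [d])) PySem.Dict.empty).keys.Nodup := by
    rw [hkeys]; exact PySem.Set.nodup_ofList _
  rw [PySem.Dict.items_eq_map_keys _ hnodup [], hkeys]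
  apply List.map_congr_left
  intro k _
  congr 1
  -- getD at k of the modify-loop = filter of data on key value k
  have hmap : data.foldl (fun res d => res.modify (pvRk key d) [] (fun l => l ++ [d])) PySem.Dict.empty
      = (data.map (fun d => (pvRk key d, d))).foldl (fun res p => res.modify p.1 [] (fun l => l ++ [p.2])) PySem.Dict.empty := by
    rw [List.foldl_map]
  rw [hmap, PySem.Dict.getD_foldl_modify_append]
  rw [List.filter_map]
  simp [PySem.Dict.getD_empty, Function.comp_def]

-- ===== VERDICT (by name: the statement is the Claim_ definition above) =====
theorem split_by_key_spec : Claim_equal_split_by_key := by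
  intro data key _hdom hpre
  unfold Spec_split_by_key split_by_key split_by_key_alt
  dsimp only
  rw [pvFold_items data key hpre]
  apply PySem.List.sorted_eq_of_perm_of_pairwise_lt
  · exact (PySem.List.sorted_perm (PySem.Set.ofList (data.map (pvRk key))) (fun k => k) false).map _
  · have := PySem.List.sorted_ofList_pairwise_lt (data.map (fun d => ((PySem.Dict.mk d).get? key).getD ""))
    exact List.Pairwise.map _ (fun a b hab => hab) this
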